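-- pv_equiv track=rewrite | github.com/ekpasowecabronneta-hue/duckclaw | scripts/duckclaw_setup_wizard.py | _section_progress
-- ===== SOURCE A (Python) =====
-- from typing import Any, Callable
--
-- SECTION_IDS = (
--     "welcome",
--     "channel",
--     "bot_mode",
--     "provider",
--     "mode",
--     "deps",
--     "token",
--     "db_path",
--     "grpo_traces",
--     "validate_provider",
--     "summary",
--     "save_launch",
-- )
--
-- def _section_progress(idx: int, state: dict[str, Any]) -> tuple[int, int]:
--     """(número actual 1-based, total) considerando secciones saltadas."""
--     order: list[int] = []
--     for i in range(len(SECTION_IDS)):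
--         sid = SECTION_IDS[i]
--         if sid == "provider" and state.get("bot_mode") != "langgraph":
--             continue
--         if sid == "grpo_traces" and state.get("bot_mode") != "langgraph":
--             continue
--         if sid == "validate_provider" and state.get("bot_mode") != "langgraph":
--             continue
--         order.append(i)
--     try:
--         pos = order.index(idx)
--         return pos + 1, len(order)
--     except ValueError:
--         return idx + 1, len(order)
-- ===== SOURCE B (Python) =====
-- SECTION_IDS = (
--     "welcome",
--     "channel",
--     "bot_mode",
--     "provider",
--     "mode",
--     "deps",
--     "token",
--     "db_path",
--     "grpo_traces",
--     "validate_provider",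
--     "summary",
--     "save_launch",
-- )
--
-- _LANGGRAPH_ONLY = ("provider", "grpo_traces", "validate_provider")
--
-- def _section_progress(idx, state):
--     """Arithmetic (no order list, no .index): position = idx minus skipped-before, 1-based."""
--     if state.get("bot_mode") == "langgraph":
--         skipped = []
--     else:
--         skipped = [i for i, sid in enumerate(SECTION_IDS) if sid in _LANGGRAPH_ONLY]
--     total = len(SECTION_IDS) - len(skipped)
--     if 0 <= idx < len(SECTION_IDS) and idx not in skipped:
--         return idx - sum(1 for s in skipped if s < idx) + 1, total
--     return idx + 1, total
-- ===== Notes on version B (the rewrite author's own statement) =====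
-- stated objective: simpler
-- what changed: Instead of building the list of kept indices and calling .index on it, B computes the skipped index list once and returns the position arithmetically as idx minus the number of skipped indices below it (falling back to idx+1 when idx is out of range or skipped), so no order list traversal or linear .index search is needed.
import Mathlib
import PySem

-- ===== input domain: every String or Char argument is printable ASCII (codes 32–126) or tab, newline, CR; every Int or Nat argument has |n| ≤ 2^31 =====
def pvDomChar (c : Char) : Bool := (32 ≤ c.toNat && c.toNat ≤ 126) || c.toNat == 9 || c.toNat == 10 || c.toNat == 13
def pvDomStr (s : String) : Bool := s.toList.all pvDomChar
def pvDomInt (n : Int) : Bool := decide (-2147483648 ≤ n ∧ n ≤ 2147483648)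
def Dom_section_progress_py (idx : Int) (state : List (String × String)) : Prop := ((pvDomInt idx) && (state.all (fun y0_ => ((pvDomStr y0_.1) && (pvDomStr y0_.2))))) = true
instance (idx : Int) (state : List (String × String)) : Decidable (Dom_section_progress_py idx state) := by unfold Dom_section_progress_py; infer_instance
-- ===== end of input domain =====

-- B replaces the order-list + .index scan by direct arithmetic from the skipped-index list (simpler decomposition, same cost).

-- ===== PORT A =====
def sectionIDs : List String :=
  ["welcome","channel","bot_mode","provider","mode","deps","token","db_path",
   "grpo_traces","validate_provider","summary","save_launch"]

-- the 'order' list A builds: indices of the sections that are not skipped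
def orderA (bm : Option String) : List Int :=
  (PySem.List.pyRange 0 (sectionIDs.length : Int) 1).foldl (fun acc i =>
    match PySem.List.pyGet? sectionIDs i with
    | some sid =>
      if sid = "provider" ∧ bm ≠ some "langgraph" then acc
      else if sid = "grpo_traces" ∧ bm ≠ some "langgraph" then acc
      else if sid = "validate_provider" ∧ bm ≠ some "langgraph" then acc
      else acc ++ [i]
    | none => acc) []

def section_progress_py (idx : Int) (state : List (String × String)) : Int × Int :=
  let bm := (PySem.Dict.ofList state).get? "bot_mode"
  let order := orderA bm
  match PySem.List.index? order idx with
  | some pos => ((pos : Int) + 1, (order.length : Int))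
  | none => (idx + 1, (order.length : Int))

-- ===== PORT B =====
-- the skipped-index list ([i for i, sid in enumerate(SECTION_IDS) if sid in _LANGGRAPH_ONLY] or [])
def skippedB (lg : Bool) : List Int :=
  if lg then []
  else (PySem.List.enumerate sectionIDs).filterMap
    (fun p => if p.2 ∈ ["provider", "grpo_traces", "validate_provider"] then some p.1 else none)

def section_progress_py_alt (idx : Int) (state : List (String × String)) : Int × Int :=
  let skipped := skippedB ((PySem.Dict.ofList state).get? "bot_mode" == some "langgraph")
  let total : Int := (sectionIDs.length : Int) - (skipped.length : Int)
  if 0 ≤ idx ∧ idx < (sectionIDs.length : Int) ∧ idx ∉ skipped then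
    (idx - ((skipped.filter (· < idx)).length : Int) + 1, total)
  else (idx + 1, total)

-- ===== PRECONDITION & SPEC =====
def Spec_section_progress_py (idx : Int) (state : List (String × String)) (out : Int × Int) : Prop := out = section_progress_py_alt idx state
instance (idx : Int) (state : List (String × String)) (out : Int × Int) : Decidable (Spec_section_progress_py idx state out) := by unfold Spec_section_progress_py; infer_instance

-- ===== CLAIM (what is proved, stated in full; the proofs are below) =====
def Claim_equal_section_progress_py : Prop := ∀ (idx : Int) (state : List (String × String)), Dom_section_progress_py idx state → Spec_section_progress_py idx state (section_progress_py idx state)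

-- ===== LEMMAS AND PROOFS =====

theorem orderA_lg : orderA (some "langgraph") = [0,1,2,3,4,5,6,7,8,9,10,11] := by decide

theorem orderA_not {o : Option String} (h : ¬ o = some "langgraph") :
    orderA o = [0,1,2,4,5,6,7,10,11] := by
  unfold orderA
  simp only [h, ne_eq, not_false_eq_true, and_true]
  decide

theorem skippedB_true : skippedB true = [] := rfl

theorem skippedB_false : skippedB false = [3, 8, 9] := by decide

-- ===== VERDICT (by name: the statement is the Claim_ definition above) =====
theorem section_progress_py_spec : Claim_equal_section_progress_py := by
  intro idx state _
  unfold Spec_section_progress_py section_progress_py section_progress_py_alt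
  generalize (PySem.Dict.ofList state).get? "bot_mode" = o
  by_cases h : o = some "langgraph"
  · subst h
    have hlg : ((some "langgraph" : Option String) == some "langgraph") = true := by decide
    simp only [orderA_lg, hlg, skippedB_true]
    by_cases h1 : 0 ≤ idx
    · by_cases h2 : idx < 12
      · interval_cases idx <;> decide
      · have hni : PySem.List.index? ([0,1,2,3,4,5,6,7,8,9,10,11] : List Int) idx = none := by
          rw [PySem.List.index?_eq_none_iff]; simp; omega
        rw [hni, if_neg (by simp [sectionIDs]; omega)]
        norm_num [sectionIDs]
    · have hni : PySem.List.index? ([0,1,2,3,4,5,6,7,8,9,10,11] : List Int) idx = none := by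
        rw [PySem.List.index?_eq_none_iff]; simp; omega
      rw [hni, if_neg (by simp [sectionIDs]; omega)]
      norm_num [sectionIDs]
  · have hlg : (o == some "langgraph") = false := by simpa using h
    simp only [orderA_not h, hlg, skippedB_false]
    by_cases h1 : 0 ≤ idx
    · by_cases h2 : idx < 12
      · interval_cases idx <;> decide
      · have hni : PySem.List.index? ([0,1,2,4,5,6,7,10,11] : List Int) idx = none := by
          rw [PySem.List.index?_eq_none_iff]; simp; omega
        rw [hni, if_neg (by simp [sectionIDs]; omega)]
        norm_num [sectionIDs]
    · have hni : PySem.List.index? ([0,1,2,4,5,6,7,10,11] : List Int) idx = none := by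
        rw [PySem.List.index?_eq_none_iff]; simp; omega
      rw [hni, if_neg (by simp [sectionIDs]; omega)]
      norm_num [sectionIDs]
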